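-- pv_equiv track=rewrite | github.com/PatoLocos/Erdos530 | experiments/sidon_b2_exact.py | verify_b2
-- ===== SOURCE A (Python) =====
-- def verify_b2(S: list[int]) -> bool:
--     """Verify S is a B₂ set (all sums a+b with a ≤ b are distinct)."""
--     sums = set()
--     for i, a in enumerate(S):
--         for b in S[i:]:  # b ≥ a
--             s = a + b
--             if s in sums:
--                 return False
--             sums.add(s)
--     return True
-- ===== SOURCE B (Python) =====
-- def verify_b2(S: list[int]) -> bool:
--     """B2 check by sort-then-scan: sort all pairwise sums (a <= b by position),
--     then the multiset is duplicate-free iff every adjacent pair strictly increases."""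
--     sums = sorted(a + b for i, a in enumerate(S) for b in S[i:])
--     return all(x < y for x, y in zip(sums, sums[1:]))
-- ===== Notes on version B (the rewrite author's own statement) =====
-- stated objective: alternative
-- what changed: Replaces the hash-set with in-loop membership test and early return by a sort-then-scan algorithm: generate all pairwise sums, sort them, and decide distinctness by checking that every adjacent pair is strictly increasing (no set is used at all).
import Mathlib
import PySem

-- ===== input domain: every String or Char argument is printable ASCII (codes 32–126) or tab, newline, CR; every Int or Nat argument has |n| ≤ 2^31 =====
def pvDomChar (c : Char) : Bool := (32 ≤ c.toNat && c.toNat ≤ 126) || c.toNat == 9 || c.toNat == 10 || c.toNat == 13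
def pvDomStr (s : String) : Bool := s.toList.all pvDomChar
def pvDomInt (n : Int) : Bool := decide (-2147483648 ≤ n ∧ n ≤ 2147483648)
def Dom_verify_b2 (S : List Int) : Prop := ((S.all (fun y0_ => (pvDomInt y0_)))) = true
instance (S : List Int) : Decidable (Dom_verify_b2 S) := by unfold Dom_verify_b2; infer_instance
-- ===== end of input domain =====

-- B replaces A's stateful set-with-early-return by sort-then-scan: sort all pairwise sums,
-- then check every adjacent pair strictly increases (no set used; alternative algorithm).


-- ===== PORT A =====
-- inner loop: for b in S[i:]: s = a+b; if s in sums: return False (none); sums.add(s)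
def verify_b2_inner (a : Int) (bs : List Int) (sums : PySem.Set Int) : Option (PySem.Set Int) :=
  match bs with
  | [] => some sums
  | b :: t =>
    let s := a + b
    if s ∈ sums then none else verify_b2_inner a t (sums.add s)

-- outer loop: for i, a in enumerate(S): …
def verify_b2_outer (S : List Int) (pairs : List (Int × Int)) (sums : PySem.Set Int) : Bool :=
  match pairs with
  | [] => true
  | (i, a) :: rest =>
    match verify_b2_inner a (PySem.List.slice S (some i) none) sums with
    | none => false
    | some sums' => verify_b2_outer S rest sums'

def verify_b2 (S : List Int) : Bool :=
  verify_b2_outer S (PySem.List.enumerate S 0) PySem.Set.empty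

-- ===== PORT B =====
-- sums = sorted(a + b for i, a in enumerate(S) for b in S[i:])
-- return all(x < y for x, y in zip(sums, sums[1:]))
def verify_b2_alt (S : List Int) : Bool :=
  let sums := PySem.List.sorted
    ((PySem.List.enumerate S 0).flatMap
      (fun p => (PySem.List.slice S (some p.1) none).map (fun b => p.2 + b)))
    (fun x => x) false
  (sums.zip (PySem.List.slice sums (some 1) none)).all (fun p => p.1 < p.2)

-- ===== PRECONDITION & SPEC =====
def Spec_verify_b2 (S : List Int) (out : Bool) : Prop := out = verify_b2_alt S
instance (S : List Int) (out : Bool) : Decidable (Spec_verify_b2 S out) := by unfold Spec_verify_b2; infer_instance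

-- ===== CLAIM (what is proved, stated in full; the proofs are below) =====
def Claim_equal_verify_b2 : Prop := ∀ (S : List Int), Dom_verify_b2 S → Spec_verify_b2 S (verify_b2 S)

-- ===== LEMMAS AND PROOFS =====

-- One-at-a-time processing of a flat list of sums: the common shape of A's computation.
def goFlat (l : List Int) (sums : PySem.Set Int) : Option (PySem.Set Int) :=
  match l with
  | [] => some sums
  | s :: t => if s ∈ sums then none else goFlat t (sums.add s)

theorem inner_eq_goFlat (a : Int) (bs : List Int) (sums : PySem.Set Int) :
    verify_b2_inner a bs sums = goFlat (bs.map (fun b => a + b)) sums := by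
  induction bs generalizing sums with
  | nil => rfl
  | cons b t ih =>
    simp only [verify_b2_inner, goFlat, List.map]
    split_ifs <;> simp [ih]

theorem goFlat_append (xs ys : List Int) (sums : PySem.Set Int) :
    goFlat (xs ++ ys) sums = (goFlat xs sums).bind (fun s' => goFlat ys s') := by
  induction xs generalizing sums with
  | nil => rfl
  | cons x t ih =>
    simp only [List.cons_append, goFlat]
    split_ifs <;> simp [ih]

theorem outer_eq_goFlat (S : List Int) (pairs : List (Int × Int)) (sums : PySem.Set Int) :
    verify_b2_outer S pairs sums =
      (goFlat (pairs.flatMap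
        (fun p => (PySem.List.slice S (some p.1) none).map (fun b => p.2 + b))) sums).isSome := by
  induction pairs generalizing sums with
  | nil => rfl
  | cons p rest ih =>
    obtain ⟨i, a⟩ := p
    simp only [verify_b2_outer, List.flatMap_cons, goFlat_append, inner_eq_goFlat]
    cases goFlat ((PySem.List.slice S (some i) none).map (fun b => a + b)) sums with
    | none => rfl
    | some s' => simpa using ih s'

-- goFlat succeeds exactly on a duplicate-free list of sums none of which was seen.
theorem goFlat_isSome_iff (l : List Int) (sums : PySem.Set Int) :
    (goFlat l sums).isSome ↔ l.Nodup ∧ ∀ x ∈ l, x ∉ sums := by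
  induction l generalizing sums with
  | nil => simp [goFlat]
  | cons s t ih =>
    simp only [goFlat, List.nodup_cons, List.mem_cons]
    split_ifs with hmem
    · simp only [Option.isSome_none, Bool.false_eq_true, false_iff]
      rintro ⟨-, hall⟩
      exact hall s (Or.inl rfl) hmem
    · rw [ih]
      constructor
      · rintro ⟨hnd, hall⟩
        refine ⟨⟨fun hst => hall s hst ((PySem.Set.mem_add sums s s).mpr (Or.inr rfl)), hnd⟩, ?_⟩
        rintro x (rfl | hx)
        · exact hmem
        · exact fun hin => hall x hx ((PySem.Set.mem_add sums s x).mpr (Or.inl hin))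
      · rintro ⟨⟨hst, hnd⟩, hall⟩
        refine ⟨hnd, fun x hx hin => ?_⟩
        rcases (PySem.Set.mem_add sums s x).mp hin with hin | rfl
        · exact hall x (Or.inr hx) hin
        · exact hst hx

-- adjacent zip check = Chain' (<)
theorem zip_all_lt_iff_chain (l : List Int) :
    ((l.zip l.tail).all (fun p => p.1 < p.2) = true) ↔ l.IsChain (· < ·) := by
  induction l with
  | nil => simp
  | cons a t ih =>
    cases t with
    | nil => simp
    | cons b t' =>
      simp only [List.tail_cons, List.zip_cons_cons, List.all_cons, List.isChain_cons_cons,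
        Bool.and_eq_true, decide_eq_true_eq]
      rw [← ih]
      simp

-- a (≤)-sorted list is IsChain (<) iff it has no duplicates
theorem chain_lt_iff_nodup_of_sorted (l : List Int) (hs : l.Pairwise (· ≤ ·)) :
    l.IsChain (· < ·) ↔ l.Nodup := by
  rw [List.isChain_iff_pairwise]
  constructor
  · exact fun h => h.imp ne_of_lt
  · intro hnd
    exact (hs.and hnd).imp (fun h => lt_of_le_of_ne h.1 h.2)

-- ===== VERDICT (by name: the statement is the Claim_ definition above) =====
theorem verify_b2_spec : Claim_equal_verify_b2 := by
  intro S _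
  unfold Spec_verify_b2 verify_b2 verify_b2_alt
  rw [outer_eq_goFlat]
  set allSums := (PySem.List.enumerate S 0).flatMap
    (fun p => (PySem.List.slice S (some p.1) none).map (fun b => p.2 + b)) with hall
  set srt := PySem.List.sorted allSums (fun x => x) false with hsrt
  show _ = (srt.zip (PySem.List.slice srt (some 1) none)).all (fun p => p.1 < p.2)
  rw [PySem.List.slice_from_one]
  rw [Bool.eq_iff_iff, zip_all_lt_iff_chain,
    chain_lt_iff_nodup_of_sorted srt (by simpa using PySem.List.sorted_pairwise allSums (fun x => x)),
    (PySem.List.sorted_perm allSums (fun x => x) false).nodup_iff,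
    goFlat_isSome_iff]
  simp [PySem.Set.empty]
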